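-- pv_equiv track=rewrite | github.com/Sn00pbom/marketscantool | valuehunter/grade/general.py | value_chain
-- ===== SOURCE A (Python) =====
-- def value_chain(vals, istart: int) -> int:
--     i1 = istart
--     i2 = istart + 1
--     direction = None
--     chain = 0
--     while i2 < len(vals):
--         a = vals[i1]
--         b = vals[i2]
--         if direction is None:
--             if a > b:
--                 direction = 'up'
--                 chain += 1
--             elif b > a:
--                 direction = 'down'
--                 chain *= -1
--                 chain -= 1
--             else:
--                 chain += 1
--         elif direction is 'up' and a >= b:
--             chain += 1
--         elif direction is 'down' and a <= b:
--             chain -= 1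
--         else:
--             return chain
--
--         i1 += 1
--         i2 += 1
--     return chain
-- ===== SOURCE B (Python) =====
-- def value_chain(vals, istart: int) -> int:
--     n = len(vals)
--     # phase 1: skip leading equal pairs
--     i = istart
--     while i + 1 < n and vals[i] == vals[i + 1]:
--         i += 1
--     if i + 1 >= n:
--         # no strictly ordered pair: one unit per scanned pair (0 if none)
--         return max(0, (n - 1) - istart)
--     if vals[i] > vals[i + 1]:
--         # phase 2a: maximal non-increasing run from istart
--         j = i + 1
--         while j + 1 < n and vals[j] >= vals[j + 1]:
--             j += 1
--         return j - istart
--     else: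
--         # phase 2b: maximal non-decreasing run from istart, negated
--         j = i + 1
--         while j + 1 < n and vals[j] <= vals[j + 1]:
--             j += 1
--         return istart - j
-- ===== Notes on version B (the rewrite author's own statement) =====
-- stated objective: simpler
-- what changed: Replaces A's single state-machine loop carrying a direction flag and a signed counter by three separate phases: skip leading equal pairs, then a plain counting loop for the non-increasing (or non-decreasing) run, with the sign applied once at the end.
import Mathlib
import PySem

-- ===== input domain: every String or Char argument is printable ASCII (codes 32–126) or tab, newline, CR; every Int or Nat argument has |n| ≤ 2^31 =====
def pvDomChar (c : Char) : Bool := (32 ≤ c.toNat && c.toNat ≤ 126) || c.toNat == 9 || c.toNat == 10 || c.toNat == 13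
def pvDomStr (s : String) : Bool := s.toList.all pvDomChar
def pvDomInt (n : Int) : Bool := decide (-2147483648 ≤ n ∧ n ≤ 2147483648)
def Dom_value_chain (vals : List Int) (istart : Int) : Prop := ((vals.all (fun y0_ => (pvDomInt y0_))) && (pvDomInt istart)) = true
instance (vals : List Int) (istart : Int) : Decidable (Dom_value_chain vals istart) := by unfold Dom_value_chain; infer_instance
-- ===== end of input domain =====

-- B replaces A's one-pass direction state machine by a three-phase scan (skip equal pairs,
-- then count the monotone run in the detected direction); objective: simpler, same O(n) cost.
-- All while loops are ported with a Nat fuel that is provably sufficient (a totality guard only).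

-- ===== PORT A =====
-- A's while loop: state (i1, i2, direction, chain); direction none / some true ('up') / some false ('down').
-- On an out-of-range index (Python IndexError, excluded by Pre_) the port returns 0.
def valueChainLoop (vals : List Int) (fuel : Nat) (i1 i2 : Int) (dir : Option Bool) (chain : Int) : Int :=
  match fuel with
  | 0 => chain
  | fuel' + 1 =>
    if i2 < (vals.length : Int) then
      match PySem.List.pyGet? vals i1, PySem.List.pyGet? vals i2 with
      | some a, some b =>
        match dir with
        | none =>
          if a > b then valueChainLoop vals fuel' (i1 + 1) (i2 + 1) (some true) (chain + 1)
          else if b > a then valueChainLoop vals fuel' (i1 + 1) (i2 + 1) (some false) (chain * (-1) - 1)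
          else valueChainLoop vals fuel' (i1 + 1) (i2 + 1) none (chain + 1)
        | some true => if a ≥ b then valueChainLoop vals fuel' (i1 + 1) (i2 + 1) (some true) (chain + 1) else chain
        | some false => if a ≤ b then valueChainLoop vals fuel' (i1 + 1) (i2 + 1) (some false) (chain - 1) else chain
      | _, _ => 0
    else chain

def value_chain (vals : List Int) (istart : Int) : Int :=
  valueChainLoop vals ((vals.length : Int) - istart).toNat istart (istart + 1) none 0

-- ===== PORT B =====
-- phase 1: skip leading equal pairs
def eqSkip (vals : List Int) (fuel : Nat) (i : Int) : Int :=
  match fuel with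
  | 0 => i
  | fuel' + 1 =>
    if i + 1 < (vals.length : Int) then
      match PySem.List.pyGet? vals i, PySem.List.pyGet? vals (i + 1) with
      | some a, some b => if a = b then eqSkip vals fuel' (i + 1) else i
      | _, _ => i
    else i

-- phase 2a: end of the maximal non-increasing run
def runDownhill (vals : List Int) (fuel : Nat) (j : Int) : Int :=
  match fuel with
  | 0 => j
  | fuel' + 1 =>
    if j + 1 < (vals.length : Int) then
      match PySem.List.pyGet? vals j, PySem.List.pyGet? vals (j + 1) with
      | some a, some b => if a ≥ b then runDownhill vals fuel' (j + 1) else j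
      | _, _ => j
    else j

-- phase 2b: end of the maximal non-decreasing run
def runUphill (vals : List Int) (fuel : Nat) (j : Int) : Int :=
  match fuel with
  | 0 => j
  | fuel' + 1 =>
    if j + 1 < (vals.length : Int) then
      match PySem.List.pyGet? vals j, PySem.List.pyGet? vals (j + 1) with
      | some a, some b => if a ≤ b then runUphill vals fuel' (j + 1) else j
      | _, _ => j
    else j

def value_chain_alt (vals : List Int) (istart : Int) : Int :=
  let n : Int := vals.length
  let i := eqSkip vals (n - istart).toNat istart
  if i + 1 ≥ n then max 0 ((n - 1) - istart)
  else
    match PySem.List.pyGet? vals i, PySem.List.pyGet? vals (i + 1) with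
    | some a, some b =>
      if a > b then runDownhill vals (n - (i + 1)).toNat (i + 1) - istart
      else istart - runUphill vals (n - (i + 1)).toNat (i + 1)
    | _, _ => 0

-- ===== PRECONDITION & SPEC =====
-- Pre_ excludes exactly the inputs where Python A raises IndexError
-- (istart < -len(vals) while the loop is entered); B raises there too.
def Pre_value_chain (vals : List Int) (istart : Int) : Prop :=
  -(vals.length : Int) ≤ istart ∨ (vals.length : Int) ≤ istart + 1
instance (vals : List Int) (istart : Int) : Decidable (Pre_value_chain vals istart) := by
  unfold Pre_value_chain; infer_instance

def pvWitness_value_chain : List Int × Int := ([3, 2, 2, 1], 0)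

def Spec_value_chain (vals : List Int) (istart : Int) (out : Int) : Prop := out = value_chain_alt vals istart
instance (vals : List Int) (istart : Int) (out : Int) : Decidable (Spec_value_chain vals istart out) := by unfold Spec_value_chain; infer_instance

-- ===== CLAIM (what is proved, stated in full; the proofs are below) =====
def Claim_equal_value_chain : Prop := ∀ (vals : List Int) (istart : Int), Dom_value_chain vals istart → Pre_value_chain vals istart → Spec_value_chain vals istart (value_chain vals istart)

-- ===== LEMMAS AND PROOFS =====

theorem pyGet?_isSome_of_inRange {vals : List Int} {i : Int}
    (h1 : -(vals.length : Int) ≤ i) (h2 : i < (vals.length : Int)) :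
    ∃ v, PySem.List.pyGet? vals i = some v := by
  cases hg : PySem.List.pyGet? vals i with
  | some v => exact ⟨v, rfl⟩
  | none =>
    rw [PySem.List.pyGet?_eq_none_iff] at hg
    exact absurd (by constructor <;> omega : PySem.Raise.InRange vals.length i) hg

theorem pyGetD_eq_of_some {vals : List Int} {i a : Int}
    (h : PySem.List.pyGet? vals i = some a) : PySem.List.pyGetD vals i 0 = a := by
  simp [PySem.List.pyGetD, h]

theorem loop_stop (vals : List Int) (fuel : Nat) (i1 i2 : Int) (dir : Option Bool) (chain : Int)
    (h : ¬ i2 < (vals.length : Int)) : valueChainLoop vals fuel i1 i2 dir chain = chain := by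
  cases fuel <;> simp [valueChainLoop, h]

theorem eqSkip_stop (vals : List Int) (fuel : Nat) (i : Int)
    (h : ¬ i + 1 < (vals.length : Int)) : eqSkip vals fuel i = i := by
  cases fuel <;> simp [eqSkip, h]

theorem runDownhill_stop (vals : List Int) (fuel : Nat) (j : Int)
    (h : ¬ j + 1 < (vals.length : Int)) : runDownhill vals fuel j = j := by
  cases fuel <;> simp [runDownhill, h]

theorem runUphill_stop (vals : List Int) (fuel : Nat) (j : Int)
    (h : ¬ j + 1 < (vals.length : Int)) : runUphill vals fuel j = j := by
  cases fuel <;> simp [runUphill, h]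

theorem eqSkip_ge (vals : List Int) (fuel : Nat) : ∀ i : Int, i ≤ eqSkip vals fuel i := by
  induction fuel with
  | zero => intro i; simp [eqSkip]
  | succ n ih =>
    intro i
    rw [eqSkip]
    split
    · split
      · split
        · have := ih (i + 1); omega
        · omega
      · omega
    · omega

theorem eqSkip_le (vals : List Int) (fuel : Nat) :
    ∀ i : Int, i + 1 < (vals.length : Int) → eqSkip vals fuel i ≤ (vals.length : Int) - 1 := by
  induction fuel with
  | zero => intro i h; simp [eqSkip]; omega
  | succ n ih =>
    intro i h
    rw [eqSkip]
    split
    · split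
      · split
        · by_cases h2 : i + 2 < (vals.length : Int)
          · exact ih (i + 1) (by omega)
          · rw [eqSkip_stop vals n (i + 1) (by omega)]; omega
        · omega
      · omega
    · omega

theorem upPhase (vals : List Int) (fl : Nat) :
    ∀ (j c : Int) (fr : Nat), -(vals.length : Int) ≤ j →
    ((vals.length : Int) - (j + 1)).toNat ≤ fl →
    ((vals.length : Int) - (j + 1)).toNat ≤ fr →
    valueChainLoop vals fl j (j + 1) (some true) c = c + (runDownhill vals fr j - j) := by
  induction fl with
  | zero =>
    intro j c fr hj hfl hfr
    rw [loop_stop vals 0 j (j + 1) (some true) c (by omega),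
      runDownhill_stop vals fr j (by omega)]
    omega
  | succ n ih =>
    intro j c fr hj hfl hfr
    by_cases h : j + 1 < (vals.length : Int)
    · obtain ⟨a, ha⟩ := pyGet?_isSome_of_inRange (vals := vals) (i := j) hj (by omega)
      obtain ⟨b, hb⟩ := pyGet?_isSome_of_inRange (vals := vals) (i := j + 1) (by omega) h
      obtain ⟨fr', rfl⟩ : ∃ k, fr = k + 1 := ⟨fr - 1, by omega⟩
      rw [valueChainLoop, runDownhill]
      simp only [ha, hb]
      rw [if_pos h, if_pos h]
      by_cases hab : a ≥ b
      · rw [if_pos hab, if_pos hab, ih (j + 1) (c + 1) fr' (by omega) (by omega) (by omega)]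
        omega
      · rw [if_neg hab, if_neg hab]
        omega
    · rw [loop_stop vals (n + 1) j (j + 1) (some true) c h, runDownhill_stop vals fr j h]
      omega

theorem downPhase (vals : List Int) (fl : Nat) :
    ∀ (j c : Int) (fr : Nat), -(vals.length : Int) ≤ j →
    ((vals.length : Int) - (j + 1)).toNat ≤ fl →
    ((vals.length : Int) - (j + 1)).toNat ≤ fr →
    valueChainLoop vals fl j (j + 1) (some false) c = c - (runUphill vals fr j - j) := by
  induction fl with
  | zero =>
    intro j c fr hj hfl hfr
    rw [loop_stop vals 0 j (j + 1) (some false) c (by omega),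
      runUphill_stop vals fr j (by omega)]
    omega
  | succ n ih =>
    intro j c fr hj hfl hfr
    by_cases h : j + 1 < (vals.length : Int)
    · obtain ⟨a, ha⟩ := pyGet?_isSome_of_inRange (vals := vals) (i := j) hj (by omega)
      obtain ⟨b, hb⟩ := pyGet?_isSome_of_inRange (vals := vals) (i := j + 1) (by omega) h
      obtain ⟨fr', rfl⟩ : ∃ k, fr = k + 1 := ⟨fr - 1, by omega⟩
      rw [valueChainLoop, runUphill]
      simp only [ha, hb]
      rw [if_pos h, if_pos h]
      by_cases hab : a ≤ b
      · rw [if_pos hab, if_pos hab, ih (j + 1) (c - 1) fr' (by omega) (by omega) (by omega)]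
        omega
      · rw [if_neg hab, if_neg hab]
        omega
    · rw [loop_stop vals (n + 1) j (j + 1) (some false) c h, runUphill_stop vals fr j h]
      omega

theorem nonePhase (vals : List Int) (fl : Nat) :
    ∀ (i c : Int) (fe : Nat), -(vals.length : Int) ≤ i →
    ((vals.length : Int) - (i + 1)).toNat ≤ fl →
    ((vals.length : Int) - (i + 1)).toNat ≤ fe →
    valueChainLoop vals fl i (i + 1) none c =
      if eqSkip vals fe i + 1 ≥ (vals.length : Int) then c + (eqSkip vals fe i - i)
      else if PySem.List.pyGetD vals (eqSkip vals fe i) 0 > PySem.List.pyGetD vals (eqSkip vals fe i + 1) 0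
        then c + (eqSkip vals fe i - i) + 1 + (runDownhill vals ((vals.length : Int) - (eqSkip vals fe i + 1)).toNat (eqSkip vals fe i + 1) - (eqSkip vals fe i + 1))
        else (c + (eqSkip vals fe i - i)) * (-1) - 1 - (runUphill vals ((vals.length : Int) - (eqSkip vals fe i + 1)).toNat (eqSkip vals fe i + 1) - (eqSkip vals fe i + 1)) := by
  induction fl with
  | zero =>
    intro i c fe hi hfl hfe
    have h : ¬ i + 1 < (vals.length : Int) := by omega
    rw [loop_stop vals 0 i (i + 1) none c h, eqSkip_stop vals fe i h, if_pos (by omega)]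
    omega
  | succ n ih =>
    intro i c fe hi hfl hfe
    by_cases h : i + 1 < (vals.length : Int)
    · obtain ⟨a, ha⟩ := pyGet?_isSome_of_inRange (vals := vals) (i := i) hi (by omega)
      obtain ⟨b, hb⟩ := pyGet?_isSome_of_inRange (vals := vals) (i := i + 1) (by omega) h
      obtain ⟨fe', rfl⟩ : ∃ k, fe = k + 1 := ⟨fe - 1, by omega⟩
      have heq : eqSkip vals (fe' + 1) i = if a = b then eqSkip vals fe' (i + 1) else i := by
        rw [eqSkip]
        simp only [ha, hb]
        rw [if_pos h]
      rw [valueChainLoop]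
      simp only [ha, hb]
      rw [if_pos h]
      by_cases hab : a > b
      · have hne : ¬ a = b := by omega
        have he : eqSkip vals (fe' + 1) i = i := by rw [heq, if_neg hne]
        rw [if_pos hab,
          upPhase vals n (i + 1) (c + 1) ((vals.length : Int) - (i + 1)).toNat (by omega) (by omega) (by omega),
          he, if_neg (by omega), pyGetD_eq_of_some ha, pyGetD_eq_of_some hb, if_pos hab]
        omega
      · by_cases hba : b > a
        · have hne : ¬ a = b := by omega
          have he : eqSkip vals (fe' + 1) i = i := by rw [heq, if_neg hne]
          rw [if_neg hab, if_pos hba,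
            downPhase vals n (i + 1) (c * (-1) - 1) ((vals.length : Int) - (i + 1)).toNat (by omega) (by omega) (by omega),
            he, if_neg (by omega), pyGetD_eq_of_some ha, pyGetD_eq_of_some hb, if_neg hab]
          omega
        · have hab' : a = b := by omega
          have he : eqSkip vals (fe' + 1) i = eqSkip vals fe' (i + 1) := by rw [heq, if_pos hab']
          rw [if_neg hab, if_neg hba,
            ih (i + 1) (c + 1) fe' (by omega) (by omega) (by omega), he]
          split_ifs <;> omega
    · rw [loop_stop vals (n + 1) i (i + 1) none c h, eqSkip_stop vals fe i h, if_pos (by omega)]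
      omega

-- ===== VERDICT (by name: the statement is the Claim_ definition above) =====
theorem value_chain_spec : Claim_equal_value_chain := by
  intro vals istart _ hpre
  unfold Spec_value_chain value_chain value_chain_alt
  by_cases h : istart + 1 < (vals.length : Int)
  · have hi : -(vals.length : Int) ≤ istart := by
      rcases hpre with h1 | h1
      · exact h1
      · omega
    have hge := eqSkip_ge vals ((vals.length : Int) - istart).toNat istart
    have hle := eqSkip_le vals ((vals.length : Int) - istart).toNat istart h
    rw [nonePhase vals ((vals.length : Int) - istart).toNat istart 0
      ((vals.length : Int) - istart).toNat hi (by omega) (by omega)]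
    by_cases hstop : eqSkip vals ((vals.length : Int) - istart).toNat istart + 1 ≥ (vals.length : Int)
    · have he : eqSkip vals ((vals.length : Int) - istart).toNat istart = (vals.length : Int) - 1 := by omega
      rw [if_pos hstop]
      simp only [he]
      rw [max_eq_right (by omega : (0 : Int) ≤ (vals.length : Int) - 1 - istart)]
      omega
    · obtain ⟨a, ha⟩ := pyGet?_isSome_of_inRange (vals := vals)
        (i := eqSkip vals ((vals.length : Int) - istart).toNat istart) (by omega) (by omega)
      obtain ⟨b, hb⟩ := pyGet?_isSome_of_inRange (vals := vals)
        (i := eqSkip vals ((vals.length : Int) - istart).toNat istart + 1) (by omega) (by omega)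
      rw [if_neg hstop]
      rw [pyGetD_eq_of_some ha, pyGetD_eq_of_some hb]
      simp only [ha, hb]
      rw [if_neg hstop]
      by_cases hab : a > b
      · rw [if_pos hab, if_pos hab]; omega
      · rw [if_neg hab, if_neg hab]; omega
  · have he : eqSkip vals ((vals.length : Int) - istart).toNat istart = istart :=
      eqSkip_stop vals _ istart h
    rw [loop_stop vals _ istart (istart + 1) none 0 h]
    simp only [he]
    rw [if_pos (by omega), max_eq_left (by omega : (vals.length : Int) - 1 - istart ≤ 0)]
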